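-- pv_equiv track=rewrite | github.com/kimsj-git/Algorithm_Problem-solving | 백준/Silver/25194. 결전의 금요일/결전의 금요일.py | is_health
-- ===== SOURCE A (Python) =====
-- from itertools import combinations
--
-- count = [0] * 7
--
-- def is_health(count):
--     if 6 <= sum(count[1:]):
--         return True
--
--     numbers = []
--     for i in range(1, 7):
--         numbers += [i] * count[i]
--
--     n = len(numbers)
--     for i in range(1, n + 1):
--         for combi in combinations(numbers, i):
--             if sum(combi) % 7 == 4:
--                 return True
--
--     return False
-- ===== SOURCE B (Python) =====
-- def is_health(count):
--     if 6 <= sum(count[1:]):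
--         return True
--
--     reachable = set()
--     for i in range(1, 7):
--         for _ in range(min(count[i], 7)):
--             reachable = reachable | {(r + i) % 7 for r in reachable} | {i % 7}
--
--     return 4 in reachable
-- ===== Notes on version B (the rewrite author's own statement) =====
-- stated objective: alternative
-- what changed: Replaces the exponential enumeration of all subsets via itertools.combinations with a residue-reachability DP over Z/7 that folds each die into the set of reachable non-empty-subset sums mod 7.
import Mathlib
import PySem

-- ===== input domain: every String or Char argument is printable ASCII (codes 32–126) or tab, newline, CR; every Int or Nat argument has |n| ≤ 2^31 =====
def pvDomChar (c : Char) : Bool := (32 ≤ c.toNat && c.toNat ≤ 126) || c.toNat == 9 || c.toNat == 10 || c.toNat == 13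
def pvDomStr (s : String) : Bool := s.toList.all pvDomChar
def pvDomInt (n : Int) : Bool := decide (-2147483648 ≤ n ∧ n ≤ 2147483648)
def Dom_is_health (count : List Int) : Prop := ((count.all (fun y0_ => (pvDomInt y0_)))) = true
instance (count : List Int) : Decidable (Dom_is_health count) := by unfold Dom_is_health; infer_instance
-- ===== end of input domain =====

-- B replaces A's subset enumeration (itertools.combinations) with a residue-reachability
-- DP over Z/7 (objective: alternative); equal return value on every input where A returns.


-- ===== PORT A =====
-- literal port of A: guard, build the dice list, then search all combinations of every size
def is_health (count : List Int) : Bool :=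
  if 6 ≤ (PySem.List.slice count (some 1) none).sum then true
  else
    -- numbers += [i] * count[i]   (pyGetD's default 0 is reached only outside Pre_, where Python raises IndexError)
    let numbers : List Int :=
      (PySem.List.pyRange 1 7 1).foldl
        (fun acc i => acc ++ PySem.List.pyRepeat [i] (PySem.List.pyGetD count i 0)) []
    let n : Int := numbers.length
    (PySem.List.pyRange 1 (n + 1) 1).any (fun i =>
      (PySem.List.combinations numbers i.toNat).any (fun combi =>
        PySem.Int.mod combi.sum 7 == 4))

-- ===== PORT B =====
-- B-side helper: one DP step, `reachable | {(r + i) % 7 for r in reachable} | {i % 7}`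
def pvStep (i : Int) (R : PySem.Set Int) : PySem.Set Int :=
  PySem.Set.union R
    (PySem.Set.union (PySem.Set.ofList (R.map (fun r => PySem.Int.mod (r + i) 7)))
      [PySem.Int.mod i 7])

def is_health_alt (count : List Int) : Bool :=
  if 6 ≤ (PySem.List.slice count (some 1) none).sum then true
  else
    let reachable : PySem.Set Int :=
      (PySem.List.pyRange 1 7 1).foldl
        (fun R i =>
          (PySem.List.pyRange 0 (min (PySem.List.pyGetD count i 0) 7) 1).foldl
            (fun R _ => pvStep i R) R)
        PySem.Set.empty
    decide ((4 : Int) ∈ reachable)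

-- ===== PRECONDITION & SPEC =====
-- Pre_ excludes exactly the inputs where the Python A raises IndexError at count[i]:
-- lists shorter than 7 whose tail sum does not trigger the early-return guard.
def Pre_is_health (count : List Int) : Prop :=
  7 ≤ count.length ∨ 6 ≤ count.tail.sum
instance (count : List Int) : Decidable (Pre_is_health count) := by
  unfold Pre_is_health; infer_instance

def pvWitness_is_health : List Int := [0, 1, 2, 0, 0, 1, 0]

def Spec_is_health (count : List Int) (out : Bool) : Prop := out = is_health_alt count
instance (count : List Int) (out : Bool) : Decidable (Spec_is_health count out) := by
  unfold Spec_is_health; infer_instance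

-- ===== CLAIM (what is proved, stated in full; the proofs are below) =====
def Claim_equal_is_health : Prop :=
  ∀ (count : List Int), Dom_is_health count → Pre_is_health count →
    Spec_is_health count (is_health count)

-- ===== LEMMAS AND PROOFS =====

theorem mem_pvStep (i : Int) (R : PySem.Set Int) (x : Int) :
    x ∈ pvStep i R ↔ x ∈ R ∨ (∃ r ∈ R, x = PySem.Int.mod (r + i) 7) ∨ x = PySem.Int.mod i 7 := by
  simp [pvStep, PySem.Set.mem_union, PySem.Set.mem_ofList, List.mem_map, eq_comm]

-- all sets B's DP builds are duplicate-free sets of residues mod 7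
def pvInv (R : PySem.Set Int) : Prop := R.Nodup ∧ ∀ x ∈ R, 0 ≤ x ∧ x < 7

theorem pvStep_inv (i : Int) (R : PySem.Set Int) (h : pvInv R) : pvInv (pvStep i R) := by
  refine ⟨PySem.Set.nodup_union _ _ h.1, fun x hx => ?_⟩
  rcases (mem_pvStep i R x).mp hx with hx' | ⟨r, _, rfl⟩ | rfl
  · exact h.2 x hx'
  · exact ⟨PySem.Int.mod_nonneg _ (by norm_num), PySem.Int.mod_lt _ (by norm_num)⟩
  · exact ⟨PySem.Int.mod_nonneg _ (by norm_num), PySem.Int.mod_lt _ (by norm_num)⟩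

theorem pvStep_exists_append (i : Int) (R : PySem.Set Int) : ∃ t, pvStep i R = R ++ t :=
  ⟨_, PySem.Set.update_eq_append_filter R _⟩

theorem pvLen_le (R : PySem.Set Int) (h : pvInv R) : R.length ≤ 7 := by
  have hsub : R ⊆ [0, 1, 2, 3, 4, 5, 6] := by
    intro x hx
    have := h.2 x hx
    simp only [List.mem_cons, List.not_mem_nil, or_false]
    omega
  simpa using (List.subperm_of_subset h.1 hsub).length_le

theorem pvIter_inv (i : Int) : ∀ (m : Nat) (R : PySem.Set Int), pvInv R → pvInv ((pvStep i)^[m] R) := by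
  intro m
  induction m with
  | zero => exact fun R h => h
  | succ m ih => exact fun R h => by rw [Function.iterate_succ_apply]; exact ih _ (pvStep_inv i R h)

theorem pvGrowth (i : Int) (R : PySem.Set Int) :
    ∀ k : Nat, (∃ j, j < k ∧ pvStep i ((pvStep i)^[j] R) = (pvStep i)^[j] R)
      ∨ R.length + k ≤ ((pvStep i)^[k] R).length := by
  intro k
  induction k with
  | zero => right; simp
  | succ k ih =>
      rcases ih with ⟨j, hj, hfix⟩ | hlen
      · exact Or.inl ⟨j, Nat.lt_succ_of_lt hj, hfix⟩
      · by_cases hf : pvStep i ((pvStep i)^[k] R) = (pvStep i)^[k] R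
        · exact Or.inl ⟨k, Nat.lt_succ_self k, hf⟩
        · right
          rcases pvStep_exists_append i ((pvStep i)^[k] R) with ⟨t, ht⟩
          have ht' : t ≠ [] := fun h0 => hf (by rw [ht, h0, List.append_nil])
          have h1 : 1 ≤ t.length := List.length_pos_iff.mpr ht'
          rw [Function.iterate_succ_apply', ht, List.length_append]
          omega

theorem pvSaturate (i : Int) (R : PySem.Set Int) (h : pvInv R) :
    pvStep i ((pvStep i)^[7] R) = (pvStep i)^[7] R := by
  rcases pvGrowth i R 7 with ⟨j, hj, hfix⟩ | hlen
  · have h7 : (pvStep i)^[7] R = (pvStep i)^[j] R := by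
      have e : (pvStep i)^[7] R = (pvStep i)^[7 - j] ((pvStep i)^[j] R) := by
        rw [← Function.iterate_add_apply]
        congr 1
        omega
      rw [e, Function.iterate_fixed hfix]
    rw [h7]
    exact hfix
  · have hinv7 := pvIter_inv i 7 R h
    have hle7 := pvLen_le _ hinv7
    rcases pvStep_exists_append i ((pvStep i)^[7] R) with ⟨t, ht⟩
    have hle8 := pvLen_le _ (pvStep_inv i _ hinv7)
    rw [ht, List.length_append] at hle8
    have ht0 : t = [] := List.length_eq_zero_iff.mp (by omega)
    rw [ht, ht0, List.append_nil]

theorem pvIter_min (i : Int) (R : PySem.Set Int) (h : pvInv R) :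
    ∀ m : Nat, (pvStep i)^[m] R = (pvStep i)^[min m 7] R := by
  intro m
  induction m with
  | zero => simp
  | succ m ih =>
      by_cases hm : m < 7
      · have e : min (m + 1) 7 = m + 1 := by omega
        rw [e]
      · have e7 : min m 7 = 7 := by omega
        have e7' : min (m + 1) 7 = 7 := by omega
        rw [e7'] at *
        rw [Function.iterate_succ_apply', ih, e7] at *
        exact pvSaturate i R h

-- the inner loop over [i] * count[i] is an iteration of pvStep i
theorem repeat_fold_eq_iter (i c : Int) (R : PySem.Set Int) :
    (PySem.List.pyRepeat [i] c).foldl (fun R j => pvStep j R) R = (pvStep i)^[c.toNat] R := by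
  rw [PySem.List.pyRepeat_singleton,
    PySem.List.foldl_congr_mem _ _ (fun R _ => pvStep i R) _
      (fun acc x hx => by rw [List.eq_of_mem_replicate hx]),
    List.foldl_const, List.length_replicate]

-- B's capped inner loop computes the same set as folding over the whole dice block
theorem inner_eq (c i : Int) (R : PySem.Set Int) (h : pvInv R) :
    (PySem.List.pyRange 0 (min c 7) 1).foldl (fun R _ => pvStep i R) R
      = (PySem.List.pyRepeat [i] c).foldl (fun R j => pvStep j R) R := by
  rw [repeat_fold_eq_iter, List.foldl_const, PySem.List.length_pyRange_one]
  have e : (min c 7 - 0).toNat = min c.toNat 7 := by omega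
  rw [e, ← pvIter_min i R h]

-- B's nested range loops are the pvStep fold over A's dice list
theorem nested_eq (count : List Int) :
    (PySem.List.pyRange 1 7 1).foldl
      (fun R i => (PySem.List.pyRange 0 (min (PySem.List.pyGetD count i 0) 7) 1).foldl
        (fun R _ => pvStep i R) R) PySem.Set.empty
    = ((PySem.List.pyRange 1 7 1).foldl
        (fun acc i => acc ++ PySem.List.pyRepeat [i] (PySem.List.pyGetD count i 0)) []).foldl
        (fun R i => pvStep i R) PySem.Set.empty := by
  rw [PySem.List.foldl_append_eq_flatMap, List.nil_append, List.foldl_flatMap]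
  have main : ∀ (l : List Int) (R : PySem.Set Int), pvInv R →
      l.foldl (fun R i => (PySem.List.pyRange 0 (min (PySem.List.pyGetD count i 0) 7) 1).foldl
        (fun R _ => pvStep i R) R) R
      = l.foldl (fun R i => (PySem.List.pyRepeat [i] (PySem.List.pyGetD count i 0)).foldl
        (fun R i => pvStep i R) R) R := by
    intro l
    induction l with
    | nil => intro R _; rfl
    | cons a t ih =>
        intro R h
        simp only [List.foldl_cons]
        rw [inner_eq (PySem.List.pyGetD count a 0) a R h, repeat_fold_eq_iter]
        exact ih _ (pvIter_inv a _ R h)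
  exact main _ PySem.Set.empty ⟨List.nodup_nil, by simp [PySem.Set.empty]⟩

theorem reach_mem :
    ∀ (l : List Int) (R : PySem.Set Int) (x : Int),
      x ∈ l.foldl (fun R i => pvStep i R) R ↔
        x ∈ R
        ∨ (∃ a ∈ R, ∃ s : List Int, s.Sublist l ∧ s ≠ [] ∧ PySem.Int.mod (a + s.sum) 7 = x)
        ∨ (∃ s : List Int, s.Sublist l ∧ s ≠ [] ∧ PySem.Int.mod s.sum 7 = x) := by
  have hm : ∀ a : Int, PySem.Int.mod a 7 = a % 7 := fun a =>
    PySem.Int.mod_eq_emod_of_pos (by norm_num)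
  intro l
  induction l with
  | nil =>
      intro R x
      constructor
      · intro h; exact Or.inl h
      · rintro (h | ⟨a, _, s, hs, hne, _⟩ | ⟨s, hs, hne, _⟩)
        · exact h
        · exact absurd (List.sublist_nil.mp hs) hne
        · exact absurd (List.sublist_nil.mp hs) hne
  | cons i t ih =>
      intro R x
      rw [List.foldl_cons, ih]
      constructor
      · rintro (h | ⟨a, ha, s, hs, hne, hmod⟩ | ⟨s, hs, hne, hmod⟩)
        · rcases (mem_pvStep i R x).mp h with h | ⟨r, hr, rfl⟩ | rfl
          · exact Or.inl h
          · exact Or.inr (Or.inl ⟨r, hr, [i],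
              List.cons_sublist_cons.mpr (List.nil_sublist t), by simp, by simp⟩)
          · exact Or.inr (Or.inr ⟨[i],
              List.cons_sublist_cons.mpr (List.nil_sublist t), by simp, by simp⟩)
        · rcases (mem_pvStep i R a).mp ha with h | ⟨r, hr, rfl⟩ | rfl
          · exact Or.inr (Or.inl ⟨a, h, s, List.Sublist.cons i hs, hne, hmod⟩)
          · refine Or.inr (Or.inl ⟨r, hr, i :: s, List.cons_sublist_cons.mpr hs, by simp, ?_⟩)
            simp only [List.sum_cons, hm] at hmod ⊢
            omega
          · refine Or.inr (Or.inr ⟨i :: s, List.cons_sublist_cons.mpr hs, by simp, ?_⟩)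
            simp only [List.sum_cons, hm] at hmod ⊢
            omega
        · exact Or.inr (Or.inr ⟨s, List.Sublist.cons i hs, hne, hmod⟩)
      · rintro (h | ⟨a, ha, s, hs, hne, hmod⟩ | ⟨s, hs, hne, hmod⟩)
        · exact Or.inl ((mem_pvStep i R x).mpr (Or.inl h))
        · rcases List.sublist_cons_iff.mp hs with hs' | ⟨s', rfl, hs'⟩
          · exact Or.inr (Or.inl ⟨a, (mem_pvStep i R a).mpr (Or.inl ha), s, hs', hne, hmod⟩)
          · by_cases hz : s' = []
            · subst hz
              refine Or.inl ((mem_pvStep i R x).mpr (Or.inr (Or.inl ⟨a, ha, ?_⟩)))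
              simp only [List.sum_cons, List.sum_nil, add_zero] at hmod
              exact hmod.symm
            · refine Or.inr (Or.inl ⟨PySem.Int.mod (a + i) 7,
                (mem_pvStep i R _).mpr (Or.inr (Or.inl ⟨a, ha, rfl⟩)), s', hs', hz, ?_⟩)
              simp only [List.sum_cons, hm] at hmod ⊢
              omega
        · rcases List.sublist_cons_iff.mp hs with hs' | ⟨s', rfl, hs'⟩
          · exact Or.inr (Or.inr ⟨s, hs', hne, hmod⟩)
          · by_cases hz : s' = []
            · subst hz
              refine Or.inl ((mem_pvStep i R x).mpr (Or.inr (Or.inr ?_)))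
              simp only [List.sum_cons, List.sum_nil, add_zero] at hmod
              exact hmod.symm
            · refine Or.inr (Or.inl ⟨PySem.Int.mod i 7,
                (mem_pvStep i R _).mpr (Or.inr (Or.inr rfl)), s', hs', hz, ?_⟩)
              simp only [List.sum_cons, hm] at hmod ⊢
              omega

theorem combi_search (numbers : List Int) :
    ((PySem.List.pyRange 1 ((numbers.length : Int) + 1) 1).any (fun i =>
        (PySem.List.combinations numbers i.toNat).any (fun combi =>
          PySem.Int.mod combi.sum 7 == 4))) = true
      ↔ ∃ s : List Int, s.Sublist numbers ∧ s ≠ [] ∧ PySem.Int.mod s.sum 7 = 4 := by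
  simp only [List.any_eq_true, PySem.List.mem_pyRange_one,
    PySem.List.mem_combinations_iff, beq_iff_eq]
  constructor
  · rintro ⟨i, ⟨h1, _⟩, c, ⟨hsub, hlen⟩, hmod⟩
    refine ⟨c, hsub, ?_, hmod⟩
    intro hc; subst hc; simp at hlen; omega
  · rintro ⟨s, hsub, hne, hmod⟩
    have hpos : 0 < s.length := List.length_pos_iff.mpr hne
    have hle : s.length ≤ numbers.length := hsub.length_le
    exact ⟨(s.length : Int), ⟨by omega, by omega⟩, s, ⟨hsub, by omega⟩, hmod⟩

-- ===== VERDICT (by name: the statement is the Claim_ definition above) =====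
theorem is_health_spec : Claim_equal_is_health := by
  intro count _ _
  unfold Spec_is_health is_health is_health_alt
  by_cases hg : 6 ≤ (PySem.List.slice count (some 1) none).sum
  · simp [hg]
  · simp only [if_neg hg]
    rw [Bool.eq_iff_iff]
    rw [combi_search, decide_eq_true_iff, nested_eq, reach_mem]
    constructor
    · intro h
      exact Or.inr (Or.inr h)
    · rintro (h | ⟨a, ha, _⟩ | h)
      · exact absurd h (List.not_mem_nil)
      · exact absurd ha (List.not_mem_nil)
      · exact h
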